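-- pv_equiv track=rewrite | github.com/antaripJKashyap/Digital-Strategy-Assistant | cdk/chatHistory/src/main.py | fill_ai_message_timestamps
-- ===== SOURCE A (Python) =====
-- def fill_ai_message_timestamps(chat_data):
--     """
--     For each session, walk through messages in order.
--     Whenever we see an AI message with no timestamp, assign it
--     the last known user timestamp from that session.
--     """
--     from collections import defaultdict
--
--     # Group messages by session_id
--     sessions = defaultdict(list)
--     for msg in chat_data:
--         sessions[msg["SessionId"]].append(msg)
--
--     # For each session, fill AI timestamps
--     for session_id, messages in sessions.items():
--         # messages should already be in chronological order from your fetch logic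
--         last_user_ts = None
--         for msg in messages:
--             if msg["MessageType"] == "user" and msg["Timestamp"]:
--                 last_user_ts = msg["Timestamp"]
--             elif msg["MessageType"] == "ai" and msg["Timestamp"] is None and last_user_ts is not None:
--                 # Assign the AI message the last user's timestamp
--                 msg["Timestamp"] = last_user_ts
--
--     # Flatten back into a single list
--     updated_data = []
--     for msgs in sessions.values():
--         updated_data.extend(msgs)
--
--     return updated_data
-- ===== SOURCE B (Python) =====
-- def fill_ai_message_timestamps(chat_data):
--     # Different algorithm: no per-session grouping pass with a scalar state; instead a
--     # single forward pass that, for each AI message lacking a timestamp, searches the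
--     # already-processed prefix BACKWARD for that session's most recent user timestamp.
--     # Output is rebuilt in first-seen-session order (distinct sids, then filter), matching A.
--     # Mutates the message dicts in place, as A does.
--     filled = []
--     for m in chat_data:
--         if m["MessageType"] == "ai" and m["Timestamp"] is None:
--             ts = _last_user_ts(filled, m["SessionId"])
--             if ts is not None:
--                 m["Timestamp"] = ts
--         filled.append(m)
--     sids = list(dict.fromkeys(m["SessionId"] for m in filled))
--     return [m for s in sids for m in filled if m["SessionId"] == s]
--
--
-- def _last_user_ts(prefix, sid):
--     for p in reversed(prefix):
--         if p["SessionId"] == sid and p["MessageType"] == "user" and p["Timestamp"]: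
--             return p["Timestamp"]
--     return None
-- ===== Notes on version B (the rewrite author's own statement) =====
-- stated objective: alternative
-- what changed: A groups messages into a per-session dict of lists and runs a forward scalar last-user-timestamp loop inside each group; B never carries forward state: one flat pass that fills each timestamp-less AI message by searching the processed prefix backward for its session's latest truthy user timestamp, then rebuilds the output from distinct session ids with filters.
import Mathlib
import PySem

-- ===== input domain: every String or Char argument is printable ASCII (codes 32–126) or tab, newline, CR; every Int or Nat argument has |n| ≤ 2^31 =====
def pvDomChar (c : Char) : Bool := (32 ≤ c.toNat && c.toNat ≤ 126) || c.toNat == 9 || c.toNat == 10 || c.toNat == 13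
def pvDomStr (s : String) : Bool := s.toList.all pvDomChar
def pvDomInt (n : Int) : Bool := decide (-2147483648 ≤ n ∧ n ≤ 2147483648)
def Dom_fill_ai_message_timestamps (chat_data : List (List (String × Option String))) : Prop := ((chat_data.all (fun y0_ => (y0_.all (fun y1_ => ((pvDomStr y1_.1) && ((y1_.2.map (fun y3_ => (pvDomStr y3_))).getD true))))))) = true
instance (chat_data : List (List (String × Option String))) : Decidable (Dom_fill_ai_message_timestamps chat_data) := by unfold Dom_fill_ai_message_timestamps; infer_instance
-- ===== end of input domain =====

-- B replaces A's group-by-session-then-forward-scalar-scan with a stateless backward search: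
-- each timestamp-less AI message looks back through the processed prefix for its session's
-- latest truthy user timestamp; output is rebuilt from distinct session ids.  (objective: alternative)
-- Both Pythons mutate the message dicts in place; the equivalence proved here is about the return value.

-- ===== PORT A =====
-- shared accessors: msg[k] (absent key = KeyError, excluded by Pre_; modeled as None), truthiness, msg[k] = v
def pvGetK (m : List (String × Option String)) (k : String) : Option String :=
  ((PySem.Dict.mk m).get? k).getD none
def pvTruthy (o : Option String) : Bool := match o with | none => false | some s => !(s == "")
def pvSet (m : List (String × Option String)) (k : String) (v : Option String) : List (String × Option String) :=
  ((PySem.Dict.mk m).insert k v).items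

-- the inner per-session loop of A (scalar last_user_ts; mutation modeled by rebuilding the list)
def pvFillF (st : Option String × List (List (String × Option String)))
    (msg : List (String × Option String)) :
    Option String × List (List (String × Option String)) :=
  if pvGetK msg "MessageType" == some "user" && pvTruthy (pvGetK msg "Timestamp") then
    (pvGetK msg "Timestamp", st.2 ++ [msg])
  else if pvGetK msg "MessageType" == some "ai" && pvGetK msg "Timestamp" == none
          && !(st.1 == none) then
    (st.1, st.2 ++ [pvSet msg "Timestamp" st.1])
  else (st.1, st.2 ++ [msg])

def pvFillSession (messages : List (List (String × Option String))) : List (List (String × Option String)) :=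
  (messages.foldl pvFillF ((none : Option String), ([] : List (List (String × Option String))))).2

def fill_ai_message_timestamps (chat_data : List (List (String × Option String))) : List (List (String × Option String)) :=
  -- sessions = defaultdict(list); sessions[msg["SessionId"]].append(msg)
  let sessions : PySem.Dict (Option String) (List (List (String × Option String))) :=
    chat_data.foldl (fun d msg => d.modify (pvGetK msg "SessionId") [] (· ++ [msg])) PySem.Dict.empty
  -- for session_id, messages in sessions.items(): fill (mutates the stored messages)
  let sessions2 := PySem.Dict.mk (sessions.items.map (fun kv => (kv.1, pvFillSession kv.2)))
  -- updated_data = []; for msgs in sessions.values(): updated_data.extend(msgs)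
  sessions2.values.foldl (fun acc msgs => acc ++ msgs) []

-- ===== PORT B =====
-- _last_user_ts(prefix, sid): walk the prefix backward, return the first truthy user timestamp of that session
def pvLastUserTs (pre : List (List (String × Option String))) (sid : Option String) : Option String :=
  match pre.reverse.find? (fun p => pvGetK p "SessionId" == sid
      && pvGetK p "MessageType" == some "user" && pvTruthy (pvGetK p "Timestamp")) with
  | some p => pvGetK p "Timestamp"
  | none => none

-- one iteration of B's loop: maybe fill the AI message from the processed prefix, then append it
def pvStepB (filled : List (List (String × Option String))) (m : List (String × Option String)) :
    List (List (String × Option String)) :=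
  if pvGetK m "MessageType" == some "ai" && pvGetK m "Timestamp" == none then
    match pvLastUserTs filled (pvGetK m "SessionId") with
    | some t => filled ++ [pvSet m "Timestamp" (some t)]
    | none => filled ++ [m]
  else filled ++ [m]

def fill_ai_message_timestamps_alt (chat_data : List (List (String × Option String))) : List (List (String × Option String)) :=
  let filled := chat_data.foldl pvStepB []
  -- sids = list(dict.fromkeys(m["SessionId"] for m in filled))
  let sids := PySem.List.dedup (filled.map (fun m => pvGetK m "SessionId"))
  -- [m for s in sids for m in filled if m["SessionId"] == s]
  sids.flatMap (fun s => filled.filter (fun m => pvGetK m "SessionId" == s))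

-- ===== PRECONDITION & SPEC =====
-- Pre_ excludes messages missing a key A reads ("SessionId", "MessageType", and "Timestamp" for
-- user/ai messages), on which A raises KeyError; it also requires each message's keys to be distinct,
-- which every list denoting a real Python dict satisfies (a duplicate-key list denotes no dict).
def Pre_fill_ai_message_timestamps (chat_data : List (List (String × Option String))) : Prop :=
  ∀ m ∈ chat_data, (m.map Prod.fst).Nodup ∧
    (PySem.Dict.mk m).contains "SessionId" = true ∧
    (PySem.Dict.mk m).contains "MessageType" = true ∧
    (((PySem.Dict.mk m).get? "MessageType" = some (some "user") ∨
      (PySem.Dict.mk m).get? "MessageType" = some (some "ai")) →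
      (PySem.Dict.mk m).contains "Timestamp" = true)
instance (chat_data : List (List (String × Option String))) : Decidable (Pre_fill_ai_message_timestamps chat_data) := by unfold Pre_fill_ai_message_timestamps; infer_instance

def pvWitness_fill_ai_message_timestamps : (List (List (String × Option String))) :=
  [[("SessionId", some "s"), ("MessageType", some "user"), ("Timestamp", some "1")],
   [("SessionId", some "s"), ("MessageType", some "ai"), ("Timestamp", none)]]

def Spec_fill_ai_message_timestamps (chat_data : List (List (String × Option String))) (out : List (List (String × Option String))) : Prop := out = fill_ai_message_timestamps_alt chat_data
instance (chat_data : List (List (String × Option String))) (out : List (List (String × Option String))) : Decidable (Spec_fill_ai_message_timestamps chat_data out) := by unfold Spec_fill_ai_message_timestamps; infer_instance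

-- ===== CLAIM (what is proved, stated in full; the proofs are below) =====
def Claim_equal_fill_ai_message_timestamps : Prop := ∀ (chat_data : List (List (String × Option String))), Dom_fill_ai_message_timestamps chat_data → Pre_fill_ai_message_timestamps chat_data → Spec_fill_ai_message_timestamps chat_data (fill_ai_message_timestamps chat_data)

-- ===== LEMMAS AND PROOFS =====

-- proof-side structural form of A's inner loop
def fillStep (last : Option String) (m : List (String × Option String)) :
    Option String × List (String × Option String) :=
  if pvGetK m "MessageType" == some "user" && pvTruthy (pvGetK m "Timestamp") then
    (pvGetK m "Timestamp", m)
  else if pvGetK m "MessageType" == some "ai" && pvGetK m "Timestamp" == none && !(last == none) then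
    (last, pvSet m "Timestamp" last)
  else (last, m)

def fillList (last : Option String) : List (List (String × Option String)) → List (List (String × Option String))
  | [] => []
  | m :: xs => (fillStep last m).2 :: fillList (fillStep last m).1 xs

-- proof-side structural form of B's loop: the element appended at each step, and the produced suffix
def outB (pre : List (List (String × Option String))) (m : List (String × Option String)) :
    List (String × Option String) :=
  if pvGetK m "MessageType" == some "ai" && pvGetK m "Timestamp" == none then
    match pvLastUserTs pre (pvGetK m "SessionId") with
    | some t => pvSet m "Timestamp" (some t)
    | none => m
  else m

def ctxB (pre : List (List (String × Option String))) :
    List (List (String × Option String)) → List (List (String × Option String))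
  | [] => []
  | m :: xs => outB pre m :: ctxB (pre ++ [outB pre m]) xs

lemma fillF_apply (st : Option String × List (List (String × Option String)))
    (m : List (String × Option String)) :
    pvFillF st m = ((fillStep st.1 m).1, st.2 ++ [(fillStep st.1 m).2]) := by
  unfold pvFillF fillStep
  split_ifs <;> rfl

lemma fill_foldl (l : List (List (String × Option String)))
    (st : Option String × List (List (String × Option String))) :
    (l.foldl pvFillF st).2 = st.2 ++ fillList st.1 l := by
  induction l generalizing st with
  | nil => simp [fillList]
  | cons m xs ih =>
    rw [List.foldl_cons, fillF_apply, ih]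
    simp [fillList]

lemma fillSession_eq (l : List (List (String × Option String))) : pvFillSession l = fillList none l := by
  unfold pvFillSession
  rw [fill_foldl]
  rfl

lemma stepB_apply (pre : List (List (String × Option String))) (m : List (String × Option String)) :
    pvStepB pre m = pre ++ [outB pre m] := by
  unfold pvStepB outB
  split_ifs
  · cases pvLastUserTs pre (pvGetK m "SessionId") <;> rfl
  · rfl

lemma foldB (l : List (List (String × Option String))) (pre : List (List (String × Option String))) :
    l.foldl pvStepB pre = pre ++ ctxB pre l := by
  induction l generalizing pre with
  | nil => simp [ctxB]
  | cons m xs ih =>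
    rw [List.foldl_cons, stepB_apply, ih]
    simp [ctxB]

lemma sid_pvSet (m : List (String × Option String)) (v : Option String) :
    pvGetK (pvSet m "Timestamp" v) "SessionId" = pvGetK m "SessionId" := by
  simp [pvGetK, pvSet]
  rw [PySem.Dict.get?_insert_of_ne _ _ (by decide)]

lemma mt_pvSet (m : List (String × Option String)) (v : Option String) :
    pvGetK (pvSet m "Timestamp" v) "MessageType" = pvGetK m "MessageType" := by
  simp [pvGetK, pvSet]
  rw [PySem.Dict.get?_insert_of_ne _ _ (by decide)]

lemma sid_outB (pre : List (List (String × Option String))) (m : List (String × Option String)) :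
    pvGetK (outB pre m) "SessionId" = pvGetK m "SessionId" := by
  unfold outB
  split_ifs
  · cases pvLastUserTs pre (pvGetK m "SessionId") <;> simp [sid_pvSet]
  · rfl

lemma lastUserTs_snoc (pre : List (List (String × Option String)))
    (q : List (String × Option String)) (s : Option String) :
    pvLastUserTs (pre ++ [q]) s =
      if pvGetK q "SessionId" == s && pvGetK q "MessageType" == some "user"
          && pvTruthy (pvGetK q "Timestamp") then pvGetK q "Timestamp"
      else pvLastUserTs pre s := by
  unfold pvLastUserTs
  rw [List.reverse_append, List.reverse_singleton, List.singleton_append, List.find?_cons]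
  split_ifs with h
  · rw [h]
  · have hb : (pvGetK q "SessionId" == s && pvGetK q "MessageType" == some "user"
        && pvTruthy (pvGetK q "Timestamp")) = false := by
      cases hc : (pvGetK q "SessionId" == s && pvGetK q "MessageType" == some "user"
        && pvTruthy (pvGetK q "Timestamp"))
      · rfl
      · exact absurd hc h
    rw [hb]

-- the core correspondence: filtering B's backward-filled prefix-pass by a session id
-- gives exactly A's forward scalar fill of that session's messages
lemma ctxB_filter (l : List (List (String × Option String)))
    (pre : List (List (String × Option String))) (s : Option String) :
    (ctxB pre l).filter (fun m => pvGetK m "SessionId" == s)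
      = fillList (pvLastUserTs pre s) (l.filter (fun m => pvGetK m "SessionId" == s)) := by
  induction l generalizing pre with
  | nil => rfl
  | cons m xs ih =>
    rw [ctxB, List.filter_cons, List.filter_cons]
    by_cases hs : (pvGetK m "SessionId" == s) = true
    · have hsid : pvGetK m "SessionId" = s := eq_of_beq hs
      have hq : (pvGetK (outB pre m) "SessionId" == s) = true := by rw [sid_outB, hs]
      rw [if_pos hq, if_pos hs]
      have hkey : outB pre m = (fillStep (pvLastUserTs pre s) m).2 ∧
          pvLastUserTs (pre ++ [outB pre m]) s = (fillStep (pvLastUserTs pre s) m).1 := by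
        by_cases h1 : (pvGetK m "MessageType" == some "user" && pvTruthy (pvGetK m "Timestamp")) = true
        · -- user message with truthy timestamp: B leaves it, A records its timestamp
          have hu : pvGetK m "MessageType" = some "user" := eq_of_beq (Bool.and_elim_left h1)
          have hout : outB pre m = m := by
            unfold outB
            rw [show (pvGetK m "MessageType" == some "ai" && pvGetK m "Timestamp" == none) = false by
              rw [hu]; rfl]
            simp
          have hfs : fillStep (pvLastUserTs pre s) m = (pvGetK m "Timestamp", m) := by
            unfold fillStep
            rw [h1]
            simp
          refine ⟨by rw [hout, hfs], ?_⟩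
          rw [hout, lastUserTs_snoc, hfs,
            show (pvGetK m "SessionId" == s && pvGetK m "MessageType" == some "user"
              && pvTruthy (pvGetK m "Timestamp")) = true by
              rw [Bool.and_assoc, hs, Bool.true_and]; exact h1]
          simp
        · have h1f : (pvGetK m "MessageType" == some "user" && pvTruthy (pvGetK m "Timestamp")) = false :=
            Bool.eq_false_iff.mpr (fun hh => h1 hh)
          by_cases h2 : (pvGetK m "MessageType" == some "ai" && pvGetK m "Timestamp" == none) = true
          · -- AI message without timestamp
            have hmtai : pvGetK m "MessageType" = some "ai" := eq_of_beq (Bool.and_elim_left h2)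
            cases hL : pvLastUserTs pre s with
            | none =>
              have hout : outB pre m = m := by
                unfold outB
                rw [if_pos h2, hsid, hL]
              have hfs : fillStep none m = (none, m) := by
                unfold fillStep
                rw [h1f]
                simp
              refine ⟨by rw [hout, hfs], ?_⟩
              rw [hout, lastUserTs_snoc, hL, hfs,
                show (pvGetK m "SessionId" == s && pvGetK m "MessageType" == some "user"
                  && pvTruthy (pvGetK m "Timestamp")) = false by rw [hmtai]; simp]
              simp
            | some t =>
              have hout : outB pre m = pvSet m "Timestamp" (some t) := by
                unfold outB
                rw [if_pos h2, hsid, hL]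
              have hfs : fillStep (some t) m = (some t, pvSet m "Timestamp" (some t)) := by
                unfold fillStep
                rw [h1f, show (pvGetK m "MessageType" == some "ai" && pvGetK m "Timestamp" == none
                  && !((some t : Option String) == none)) = true by rw [h2]; rfl]
                simp
              refine ⟨by rw [hout, hfs], ?_⟩
              rw [hout, lastUserTs_snoc, hL, hfs,
                show (pvGetK (pvSet m "Timestamp" (some t)) "SessionId" == s
                  && pvGetK (pvSet m "Timestamp" (some t)) "MessageType" == some "user"
                  && pvTruthy (pvGetK (pvSet m "Timestamp" (some t)) "Timestamp")) = false by
                  rw [mt_pvSet, hmtai]; simp]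
              simp
          · -- every other message: both leave it and the state alone
            have h2f : (pvGetK m "MessageType" == some "ai" && pvGetK m "Timestamp" == none) = false :=
              Bool.eq_false_iff.mpr (fun hh => h2 hh)
            have hout : outB pre m = m := by
              unfold outB
              rw [h2f]
              simp
            have hfs : fillStep (pvLastUserTs pre s) m = (pvLastUserTs pre s, m) := by
              unfold fillStep
              rw [h1f, h2f, Bool.false_and]
              simp
            refine ⟨by rw [hout, hfs], ?_⟩
            rw [hout, lastUserTs_snoc, hfs,
              show (pvGetK m "SessionId" == s && pvGetK m "MessageType" == some "user"
                && pvTruthy (pvGetK m "Timestamp")) = false by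
                rw [Bool.and_assoc, h1f, Bool.and_false]]
            simp
      rw [fillList, ← hkey.1, ← hkey.2, ih]
    · have hsf : (pvGetK m "SessionId" == s) = false := Bool.eq_false_iff.mpr (fun hh => hs hh)
      have hq : (pvGetK (outB pre m) "SessionId" == s) = false := by rw [sid_outB, hsf]
      rw [hq, hsf]
      simp only [Bool.false_eq_true, if_false]
      rw [ih, lastUserTs_snoc,
        show (pvGetK (outB pre m) "SessionId" == s && pvGetK (outB pre m) "MessageType" == some "user"
          && pvTruthy (pvGetK (outB pre m) "Timestamp")) = false by
          rw [Bool.and_assoc, Bool.and_eq_false_iff]; left; rw [sid_outB]; exact hsf]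
      simp

lemma sids_ctxB (pre : List (List (String × Option String))) (xs : List (List (String × Option String))) :
    (ctxB pre xs).map (fun m => pvGetK m "SessionId") = xs.map (fun m => pvGetK m "SessionId") := by
  induction xs generalizing pre with
  | nil => rfl
  | cons m xs ih => simp [ctxB, sid_outB, ih]

-- grouping-fold characterisation (A's defaultdict)
lemma group_getD (xs : List (List (String × Option String))) (s : Option String) :
    (xs.foldl (fun d msg => d.modify (pvGetK msg "SessionId") [] (· ++ [msg])) PySem.Dict.empty).getD s []
      = xs.filter (fun m => pvGetK m "SessionId" == s) := by
  have hm : xs.foldl (fun d msg => d.modify (pvGetK msg "SessionId") [] (· ++ [msg]))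
        (PySem.Dict.empty : PySem.Dict (Option String) (List (List (String × Option String))))
      = ((xs.map (fun m => (pvGetK m "SessionId", m))).foldl
          (fun d p => d.modify p.1 [] (· ++ [p.2])) PySem.Dict.empty) := by
    rw [List.foldl_map]
  rw [hm, PySem.Dict.getD_foldl_modify_append]
  simp [List.filter_map, Function.comp_def]

lemma group_keys (xs : List (List (String × Option String))) :
    (xs.foldl (fun d msg => d.modify (pvGetK msg "SessionId") [] (· ++ [msg])) PySem.Dict.empty).keys
      = PySem.Set.update [] (xs.map (fun m => pvGetK m "SessionId")) := by
  rw [PySem.Dict.keys_foldl_modify_key]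
  simp

lemma group_nodup (xs : List (List (String × Option String))) :
    (xs.foldl (fun d msg => d.modify (pvGetK msg "SessionId") [] (· ++ [msg])) PySem.Dict.empty).keys.Nodup :=
  PySem.Dict.nodup_keys_foldl_modify_key _ _ _ _ _ PySem.Dict.nodup_keys_empty

-- ===== VERDICT (by name: the statement is the Claim_ definition above) =====
theorem fill_ai_message_timestamps_spec : Claim_equal_fill_ai_message_timestamps := by
  intro chat_data _ _
  unfold Spec_fill_ai_message_timestamps fill_ai_message_timestamps fill_ai_message_timestamps_alt
  dsimp only
  -- A's side: values of the filled groups, flattened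
  have hvalsA : (PySem.Dict.mk
        ((chat_data.foldl (fun d msg => d.modify (pvGetK msg "SessionId") [] (· ++ [msg]))
            PySem.Dict.empty).items.map (fun kv => (kv.1, pvFillSession kv.2)))).values
      = (PySem.Set.update [] (chat_data.map (fun m => pvGetK m "SessionId"))).map
          (fun s => fillList none (chat_data.filter (fun m => pvGetK m "SessionId" == s))) := by
    rw [PySem.Dict.items_eq_map_keys _ (group_nodup chat_data) []]
    simp only [PySem.Dict.values_mk, List.map_map]
    rw [group_keys]
    refine List.map_congr_left (fun s _ => ?_)
    simp only [Function.comp_apply]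
    rw [group_getD, fillSession_eq]
  rw [hvalsA, PySem.List.foldl_append_eq_flatten, List.nil_append]
  -- B's side: distinct sids, each filtered out of the backward-filled list
  rw [foldB, List.nil_append, sids_ctxB, PySem.List.dedup_eq_ofList]
  rw [List.flatMap_def]
  congr 1
  refine List.map_congr_left (fun s _ => ?_)
  rw [ctxB_filter]
  rfl
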